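-- pv_equiv track=rewrite | github.com/Shanu1110/Python | LearningWithClock.py | rotate_layer
-- ===== SOURCE A (Python) =====
-- def rotate_layer(layer, positions, direction, odd_layer):
--     n = len(layer)
--     rotated = [None] * n
--
--     if direction == "clockwise":
--         for i in range(n):
--             rotated[(i + positions) % n] = layer[i]
--     else:  # counterclockwise
--         for i in range(n):
--             rotated[(i - positions) % n] = layer[i]
--
--     # Replace characters based on layer type
--     for i in range(n):
--         if odd_layer:
--             rotated[i] = chr(((ord(rotated[i]) - ord('A') - 1) % 26) + ord('A'))
--         else:
--             rotated[i] = chr(((ord(rotated[i]) - ord('A') + 1) % 26) + ord('A'))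
--
--     return rotated
-- ===== SOURCE B (Python) =====
-- def rotate_layer(layer, positions, direction, odd_layer):
--     n = len(layer)
--     if n == 0:
--         return []
--     p = positions % n
--     k = n - p if direction == "clockwise" else p
--     rot = layer[k:] + layer[:k]
--     delta = -1 if odd_layer else 1
--     return [chr(((ord(c) - ord('A') + delta) % 26) + ord('A')) for c in rot]
-- ===== Notes on version B (the rewrite author's own statement) =====
-- stated objective: simpler
-- what changed: Replaces A's scatter loop into a preallocated [None]*n buffer plus a second in-place rewrite pass by a direct gather: one slice concatenation builds the rotated list and a single comprehension applies the Caesar shift, with the shift delta computed once instead of branching per element.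
import Mathlib
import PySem

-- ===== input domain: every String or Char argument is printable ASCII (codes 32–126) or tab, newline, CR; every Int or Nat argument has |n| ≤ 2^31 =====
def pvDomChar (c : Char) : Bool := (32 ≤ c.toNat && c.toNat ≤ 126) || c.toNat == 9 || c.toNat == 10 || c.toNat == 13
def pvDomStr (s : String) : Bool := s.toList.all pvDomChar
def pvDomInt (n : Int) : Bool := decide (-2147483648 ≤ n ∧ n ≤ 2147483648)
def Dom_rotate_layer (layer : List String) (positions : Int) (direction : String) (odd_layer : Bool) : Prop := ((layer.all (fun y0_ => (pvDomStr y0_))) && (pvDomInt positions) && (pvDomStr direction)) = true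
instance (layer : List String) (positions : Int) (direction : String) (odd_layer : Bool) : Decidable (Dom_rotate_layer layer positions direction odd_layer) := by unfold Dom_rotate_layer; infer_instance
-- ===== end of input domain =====

-- B replaces A's scatter-into-[None]*n-buffer plus second rewrite pass by a direct
-- slice-concatenation gather with a single Caesar-shift map (simpler decomposition; same cost).

-- chr(((ord(s) - ord('A') + delta) % 26) + ord('A')) — this exact expression occurs in both
-- Pythons.  ord/chr are ported by hand (exact here: the argument is one ASCII char and the
-- produced code is in 65..90); Python's ord raises on a string of length ≠ 1, which
-- Pre_rotate_layer excludes — the `_ => ""` branch is never reached under Pre_.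
def pvShift (delta : Int) (s : String) : String :=
  match s.toList with
  | [c] => String.ofList [Char.ofNat ((PySem.Int.mod ((c.toNat : Int) - 65 + delta) 26) + 65).toNat]
  | _ => ""

-- ===== PORT A =====
def rotate_layer (layer : List String) (positions : Int) (direction : String) (odd_layer : Bool) : List String :=
  let n : Int := (layer.length : Int)
  let rotated : List (Option String) := List.replicate layer.length (none : Option String)
  let rotated : List (Option String) :=
    if direction == "clockwise" then
      (PySem.List.pyRange 0 n 1).foldl
        (fun acc i => PySem.List.pySetD acc (PySem.Int.mod (i + positions) n)
          (PySem.List.pyGet? layer i)) rotated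
    else
      (PySem.List.pyRange 0 n 1).foldl
        (fun acc i => PySem.List.pySetD acc (PySem.Int.mod (i - positions) n)
          (PySem.List.pyGet? layer i)) rotated
  -- second loop: rotated[i] = chr(...); Python would raise TypeError on a None cell, but the
  -- scatter fills every cell, so the `""` default below is never reached
  rotated.map (fun o => match o with
    | some s => pvShift (if odd_layer then -1 else 1) s
    | none => "")

-- ===== PORT B =====
def rotate_layer_alt (layer : List String) (positions : Int) (direction : String) (odd_layer : Bool) : List String :=
  if layer.length = 0 then []
  else
    let n : Int := (layer.length : Int)
    let p : Int := PySem.Int.mod positions n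
    let k : Int := if direction == "clockwise" then n - p else p
    let rot : List String :=
      PySem.List.slice layer (some k) none ++ PySem.List.slice layer none (some k)
    let delta : Int := if odd_layer then -1 else 1
    rot.map (pvShift delta)

-- ===== PRECONDITION & SPEC =====
-- Pre_ excludes exactly the inputs on which Python A raises TypeError: a list element that is
-- not a single-character string (ord() needs a string of length 1).  B raises there too.
def Pre_rotate_layer (layer : List String) (positions : Int) (direction : String) (odd_layer : Bool) : Prop :=
  ∀ s ∈ layer, s.toList.length = 1
instance (layer : List String) (positions : Int) (direction : String) (odd_layer : Bool) : Decidable (Pre_rotate_layer layer positions direction odd_layer) := by unfold Pre_rotate_layer; infer_instance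

def pvWitness_rotate_layer : List String × Int × String × Bool := (["A", "Q", "z"], -3, "clockwise", false)

def Spec_rotate_layer (layer : List String) (positions : Int) (direction : String) (odd_layer : Bool) (out : List String) : Prop := out = rotate_layer_alt layer positions direction odd_layer
instance (layer : List String) (positions : Int) (direction : String) (odd_layer : Bool) (out : List String) : Decidable (Spec_rotate_layer layer positions direction odd_layer out) := by unfold Spec_rotate_layer; infer_instance

-- ===== CLAIM (what is proved, stated in full; the proofs are below) =====
def Claim_equal_rotate_layer : Prop := ∀ (layer : List String) (positions : Int) (direction : String) (odd_layer : Bool), Dom_rotate_layer layer positions direction odd_layer → Pre_rotate_layer layer positions direction odd_layer → Spec_rotate_layer layer positions direction odd_layer (rotate_layer layer positions direction odd_layer)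

-- ===== LEMMAS AND PROOFS =====

theorem pv_find?_unique {α : Type} (l : List α) (p : α → Bool) (a : α)
    (ha : a ∈ l) (h : ∀ x ∈ l, (p x = true ↔ x = a)) : l.find? p = some a := by
  induction l with
  | nil => simp at ha
  | cons b l ih =>
    by_cases hb : p b = true
    · have hba : b = a := (h b (by simp)).1 hb
      subst hba
      simp [List.find?, hb]
    · have hba : b ≠ a := fun e => hb ((h b (by simp)).2 e)
      have ha' : a ∈ l := by
        rcases List.mem_cons.1 ha with e | e
        · exact absurd e.symm hba
        · exact e
      simp only [List.find?, hb]
      exact ih ha' (fun x hx => h x (by simp [hx]))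

theorem pv_foldl_set_getElem? {α : Type} (is : List Int) (g : Int → Nat) (v : Int → α)
    (init : List α) (j : Nat) :
    ((is.foldl (fun acc i => acc.set (g i) (v i)) init))[j]? =
      match is.reverse.find? (fun i => g i == j) with
      | some i => if j < init.length then some (v i) else none
      | none => init[j]? := by
  induction is generalizing init with
  | nil => simp
  | cons i is ih =>
    simp only [List.foldl_cons, List.reverse_cons]
    rw [ih]
    rw [List.find?_append]
    cases hf : is.reverse.find? (fun i => g i == j) with
    | some k => simp [List.length_set]
    | none =>
      simp only [List.find?_singleton]
      by_cases hij : g i = j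
      · simp [hij, List.getElem?_set]
      · simp [hij, List.getElem?_set, Ne.symm hij]

theorem pv_mod_eq_iff (N x j q : Int) (hN : 0 < N) (hx0 : 0 ≤ x) (hxN : x < N)
    (hj0 : 0 ≤ j) (hjN : j < N) : (x + q) % N = j ↔ x = (j - q) % N := by
  have hxx : x % N = x := Int.emod_eq_of_lt hx0 hxN
  have hjj : j % N = j := Int.emod_eq_of_lt hj0 hjN
  constructor
  · intro h
    have hm : Int.ModEq N (x + q) j := by unfold Int.ModEq; rw [h, hjj]
    have hm2 : Int.ModEq N x (j - q) := by simpa using hm.sub_right q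
    have hx' : x % N = (j - q) % N := hm2
    rw [hxx] at hx'
    exact hx'
  · intro h
    have hm : Int.ModEq N x (j - q) := by
      unfold Int.ModEq
      rw [h, Int.emod_emod_of_dvd _ dvd_rfl]
    have hm2 : Int.ModEq N (x + q) j := by simpa using hm.add_right q
    have : (x + q) % N = j % N := hm2
    rw [hjj] at this
    exact this

theorem pv_scatter_eq (layer : List String) (q : Int) (hN : 0 < layer.length) :
    ((PySem.List.pyRange 0 (layer.length : Int) 1).foldl
        (fun acc i => PySem.List.pySetD acc (PySem.Int.mod (i + q) (layer.length : Int))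
          (PySem.List.pyGet? layer i))
        (List.replicate layer.length (none : Option String)))
      = (List.range layer.length).map
          (fun (j : Nat) => PySem.List.pyGet? layer (PySem.Int.mod ((j : Int) - q) (layer.length : Int))) := by
  have hN' : (0 : Int) < (layer.length : Int) := by exact_mod_cast hN
  have hstep : (fun (acc : List (Option String)) (i : Int) =>
      PySem.List.pySetD acc (PySem.Int.mod (i + q) (layer.length : Int)) (PySem.List.pyGet? layer i))
      = fun acc i => acc.set (PySem.Int.mod (i + q) (layer.length : Int)).toNat (PySem.List.pyGet? layer i) := by
    funext acc i
    exact PySem.List.pySetD_of_nonneg acc _ (PySem.Int.mod_nonneg _ hN')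
  rw [hstep]
  apply List.ext_getElem?
  intro j
  rw [pv_foldl_set_getElem?]
  by_cases hj : j < layer.length
  · have hfind : (PySem.List.pyRange 0 (layer.length : Int) 1).reverse.find?
        (fun i => (PySem.Int.mod (i + q) (layer.length : Int)).toNat == j) =
        some (PySem.Int.mod ((j : Int) - q) (layer.length : Int)) := by
      apply pv_find?_unique
      · rw [List.mem_reverse, PySem.List.mem_pyRange_one]
        exact ⟨PySem.Int.mod_nonneg _ hN', PySem.Int.mod_lt _ hN'⟩
      · intro x hx
        rw [List.mem_reverse, PySem.List.mem_pyRange_one] at hx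
        simp only [beq_iff_eq]
        rw [PySem.Int.mod_eq_emod_of_pos hN', PySem.Int.mod_eq_emod_of_pos hN']
        have hnn : 0 ≤ (x + q) % (layer.length : Int) := Int.emod_nonneg _ (by omega)
        have key := pv_mod_eq_iff (layer.length : Int) x (j : Int) q hN' hx.1 hx.2
          (by omega) (by exact_mod_cast hj)
        constructor
        · intro h
          exact key.1 (by omega)
        · intro h
          have := key.2 h
          omega
    rw [hfind, List.getElem?_map, List.getElem?_range hj]
    simp [hj]
  · cases hf : (PySem.List.pyRange 0 (layer.length : Int) 1).reverse.find?
        (fun i => (PySem.Int.mod (i + q) (layer.length : Int)).toNat == j) with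
    | some k =>
      simp only [List.length_replicate, hj, if_false]
      rw [List.getElem?_map]
      rw [List.getElem?_eq_none (by simpa using Nat.le_of_not_lt hj)]
      rfl
    | none =>
      rw [List.getElem?_map, List.getElem?_eq_none (by simpa using Nat.le_of_not_lt hj),
        List.getElem?_eq_none (by simpa using Nat.le_of_not_lt hj)]
      rfl

theorem pv_gather (layer : List String) (r : Int) (hN : 0 < layer.length)
    (K : Nat) (hKN : K ≤ layer.length)
    (hc : (K : Int) % (layer.length : Int) = r % (layer.length : Int)) :
    (layer.drop K ++ layer.take K).map some
      = (List.range layer.length).map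
          (fun (j : Nat) => PySem.List.pyGet? layer (PySem.Int.mod ((j : Int) + r) (layer.length : Int))) := by
  have hN' : (0 : Int) < (layer.length : Int) := by exact_mod_cast hN
  apply List.ext_getElem?
  intro j
  rw [List.getElem?_map, List.getElem?_map]
  by_cases hj : j < layer.length
  · rw [List.getElem?_range hj]
    simp only [Option.map_some]
    have hmod : PySem.Int.mod ((j : Int) + r) (layer.length : Int)
        = ((j : Int) + (K : Int)) % (layer.length : Int) := by
      rw [PySem.Int.mod_eq_emod_of_pos hN', Int.add_emod, ← hc, ← Int.add_emod]
    -- idx : the Nat index the gather reads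
    have hidx : ∃ idx : Nat, (idx : Int) = ((j : Int) + (K : Int)) % (layer.length : Int)
        ∧ (if j + K < layer.length then idx = j + K else idx = j + K - layer.length) := by
      by_cases hcase : j + K < layer.length
      · refine ⟨j + K, ?_, by simp [hcase]⟩
        rw [Int.emod_eq_of_lt (by omega) (by push_cast; omega)]
        push_cast; ring
      · refine ⟨j + K - layer.length, ?_, by simp [hcase]⟩
        have : ((j : Int) + K) % (layer.length : Int)
            = ((j : Int) + K - layer.length) % (layer.length : Int) := by
          rw [Int.sub_emod_right]
        rw [this, Int.emod_eq_of_lt (by push_cast; omega) (by push_cast; omega)]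
        push_cast; omega
    obtain ⟨idx, hidxv, hidxc⟩ := hidx
    have hidxN : idx < layer.length := by
      split_ifs at hidxc <;> omega
    rw [hmod]
    have : PySem.List.pyGet? layer (((j : Int) + (K : Int)) % (layer.length : Int))
        = layer[idx]? := by
      rw [PySem.List.pyGet?_of_nonneg layer (by omega)]
      congr 1
      omega
    rw [this, List.getElem?_append]
    by_cases hcase : j + K < layer.length
    · have hlt : j < (layer.drop K).length := by simp [List.length_drop]; omega
      rw [if_pos hlt, List.getElem?_drop]
      simp only [List.length_drop] at hlt
      have : idx = K + j := by split_ifs at hidxc <;> omega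
      rw [this, List.getElem?_eq_getElem (by omega)]
      rfl
    · have hge : ¬ j < (layer.drop K).length := by simp [List.length_drop]; omega
      rw [if_neg hge, List.getElem?_take, if_pos (by simp [List.length_drop]; omega)]
      have : idx = j - (layer.drop K).length := by
        simp only [List.length_drop]
        split_ifs at hidxc <;> omega
      rw [this]
      simp only [List.length_drop]
      rw [List.getElem?_eq_getElem (by omega)]
      rfl
  · rw [List.getElem?_eq_none (by simp; omega), List.getElem?_eq_none (by simp; omega)]
    rfl

theorem rotate_layer_eq (layer : List String) (positions : Int) (direction : String) (odd_layer : Bool) :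
    rotate_layer layer positions direction odd_layer = rotate_layer_alt layer positions direction odd_layer := by
  by_cases hn : layer.length = 0
  · have : layer = [] := List.length_eq_zero_iff.1 hn
    subst this
    simp [rotate_layer, rotate_layer_alt, PySem.List.pyRange_one_eq_nil (le_refl (0 : Int))]
  · have hN : 0 < layer.length := Nat.pos_of_ne_zero hn
    have hN' : (0 : Int) < (layer.length : Int) := by exact_mod_cast hN
    have hp0 : 0 ≤ PySem.Int.mod positions (layer.length : Int) := PySem.Int.mod_nonneg _ hN'
    have hpN : PySem.Int.mod positions (layer.length : Int) < (layer.length : Int) :=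
      PySem.Int.mod_lt _ hN'
    have hpe : PySem.Int.mod positions (layer.length : Int) = positions % (layer.length : Int) :=
      PySem.Int.mod_eq_emod_of_pos hN'
    simp only [rotate_layer, rotate_layer_alt, if_neg hn]
    by_cases hdir : (direction == "clockwise") = true
    · -- clockwise
      rw [if_pos hdir, if_pos hdir]
      set k : Int := (layer.length : Int) - PySem.Int.mod positions (layer.length : Int) with hk
      have hk0 : 0 ≤ k := by omega
      have hgather := pv_gather layer (-positions) hN k.toNat (by omega)
        (by
          have h1 : (k.toNat : Int) = k := Int.toNat_of_nonneg hk0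
          rw [h1, hk, Int.sub_emod, Int.emod_self, zero_sub, hpe,
            Int.emod_emod_of_dvd positions (dvd_refl ((layer.length : Nat) : Int))]
          have hm : Int.ModEq (layer.length : Int) (positions % (layer.length : Int)) positions :=
            Int.emod_emod_of_dvd _ dvd_rfl
          exact hm.neg)
      rw [pv_scatter_eq layer positions hN]
      rw [PySem.List.slice_from layer hk0, PySem.List.slice_to layer hk0]
      have hfun : (fun (j : Nat) => PySem.List.pyGet? layer
            (PySem.Int.mod ((j : Int) - positions) (layer.length : Int)))
          = (fun (j : Nat) => PySem.List.pyGet? layer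
            (PySem.Int.mod ((j : Int) + -positions) (layer.length : Int))) := by
        funext j; rw [sub_eq_add_neg]
      rw [hfun, ← hgather, List.map_map]
      rfl
    · -- counterclockwise
      rw [if_neg hdir, if_neg hdir]
      have hstep : (fun (acc : List (Option String)) (i : Int) =>
          PySem.List.pySetD acc (PySem.Int.mod (i - positions) (layer.length : Int))
            (PySem.List.pyGet? layer i))
          = (fun (acc : List (Option String)) (i : Int) =>
          PySem.List.pySetD acc (PySem.Int.mod (i + -positions) (layer.length : Int))
            (PySem.List.pyGet? layer i)) := by
        funext acc i; rw [sub_eq_add_neg]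
      rw [hstep, pv_scatter_eq layer (-positions) hN]
      have hgather := pv_gather layer positions hN (PySem.Int.mod positions (layer.length : Int)).toNat
        (by omega)
        (by
          have h1 : ((PySem.Int.mod positions (layer.length : Int)).toNat : Int)
              = PySem.Int.mod positions (layer.length : Int) := Int.toNat_of_nonneg hp0
          rw [h1, hpe]
          exact Int.emod_emod_of_dvd _ dvd_rfl)
      rw [PySem.List.slice_from layer hp0, PySem.List.slice_to layer hp0]
      have hfun : (fun (j : Nat) => PySem.List.pyGet? layer
            (PySem.Int.mod ((j : Int) - -positions) (layer.length : Int)))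
          = (fun (j : Nat) => PySem.List.pyGet? layer
            (PySem.Int.mod ((j : Int) + positions) (layer.length : Int))) := by
        funext j; rw [sub_neg_eq_add]
      rw [hfun, ← hgather, List.map_map]
      rfl

-- ===== VERDICT (by name: the statement is the Claim_ definition above) =====
theorem rotate_layer_spec : Claim_equal_rotate_layer := by
  intro layer positions direction odd_layer _ _
  unfold Spec_rotate_layer
  exact rotate_layer_eq layer positions direction odd_layer
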